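-- pv_equiv track=rewrite | github.com/Mithil21/Culinary_RAG_Assistant | assistant_core.py | score_grouped_dishes
-- ===== SOURCE A (Python) =====
-- from typing import TypedDict, List, Dict, Any
--
-- def score_grouped_dishes(grouped: Dict[str, Dict[str, str]]) -> List[str]:
--     """
--     Prefer dishes with more complete structure:
--     Introduction + Ingredients + Instructions
--     """
--     scored = []
--
--     for dish, parts in grouped.items():
--         score = 0
--         if parts.get("Introduction"):
--             score += 2
--         if parts.get("Ingredients"):
--             score += 3
--         if parts.get("Instructions"):
--             score += 4
--         scored.append((dish, score))
--
--     scored.sort(key=lambda x: x[1], reverse=True)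
--     return [dish for dish, _ in scored]
-- ===== SOURCE B (Python) =====
-- from typing import List, Dict
--
-- def score_grouped_dishes(grouped: Dict[str, Dict[str, str]]) -> List[str]:
--     """
--     Bucket (counting) sort: one pass dropping each dish into a score bucket,
--     then emit buckets from highest score to lowest.
--     """
--     buckets = {}
--     for dish, parts in grouped.items():
--         score = (2 if parts.get("Introduction") else 0) \
--               + (3 if parts.get("Ingredients") else 0) \
--               + (4 if parts.get("Instructions") else 0)
--         buckets.setdefault(score, []).append(dish)
--     out = []
--     for s in sorted(buckets, reverse=True):
--         out += buckets[s]
--     return out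
-- ===== Notes on version B (the rewrite author's own statement) =====
-- stated objective: alternative
-- what changed: Replaces A's build-score-list-then-stable-reverse-comparison-sort with a one-pass bucket (counting) sort: each dish is appended to a dict bucket keyed by its score, and the buckets are emitted from highest score to lowest, which preserves insertion order among equal scores exactly as the stable sort does.
import Mathlib
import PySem

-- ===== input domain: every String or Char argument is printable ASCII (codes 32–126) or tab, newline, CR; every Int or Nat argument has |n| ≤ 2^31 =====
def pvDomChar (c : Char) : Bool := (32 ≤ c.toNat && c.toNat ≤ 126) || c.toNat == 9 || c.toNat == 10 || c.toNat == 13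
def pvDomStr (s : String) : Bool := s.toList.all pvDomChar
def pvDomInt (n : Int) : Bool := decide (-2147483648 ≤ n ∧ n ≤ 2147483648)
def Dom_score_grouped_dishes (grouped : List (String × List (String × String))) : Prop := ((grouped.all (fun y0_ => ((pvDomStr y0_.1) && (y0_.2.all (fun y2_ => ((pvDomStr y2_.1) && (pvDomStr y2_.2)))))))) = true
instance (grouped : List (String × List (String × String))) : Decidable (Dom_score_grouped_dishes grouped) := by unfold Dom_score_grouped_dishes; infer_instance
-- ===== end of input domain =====

-- B replaces A's stable reverse comparison sort with a one-pass bucket (counting) sort over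
-- the score buckets, emitted from highest score to lowest (objective: alternative algorithm).

-- ===== PORT A =====
-- parts.get(k): first-match lookup in the inner dict (association list)
def pvPartsGet (parts : List (String × String)) (k : String) : Option String :=
  (PySem.Dict.mk parts).get? k

-- Python truthiness of parts.get(k): some nonempty string
def pvTruthy (o : Option String) : Bool :=
  match o with
  | none => false
  | some s => !s.toList.isEmpty

-- the loop body's score accumulation of A: score = 0; += 2; += 3; += 4
def pvScoreSteps (parts : List (String × String)) : Int :=
  let score : Int := 0
  let score := if pvTruthy (pvPartsGet parts "Introduction") then score + 2 else score
  let score := if pvTruthy (pvPartsGet parts "Ingredients") then score + 3 else score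
  let score := if pvTruthy (pvPartsGet parts "Instructions") then score + 4 else score
  score

def score_grouped_dishes (grouped : List (String × List (String × String))) : List String :=
  let scored : List (String × Int) :=
    grouped.foldl (fun scored dp => scored ++ [(dp.1, pvScoreSteps dp.2)]) []
  (PySem.List.sorted scored (fun x => x.2) true).map (fun x => x.1)

-- ===== PORT B =====
-- B's score as one conditional-expression sum
def pvScore (parts : List (String × String)) : Int :=
  (if pvTruthy (pvPartsGet parts "Introduction") then 2 else 0) +
  (if pvTruthy (pvPartsGet parts "Ingredients") then 3 else 0) +
  (if pvTruthy (pvPartsGet parts "Instructions") then 4 else 0)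

def score_grouped_dishes_alt (grouped : List (String × List (String × String))) : List String :=
  let buckets : PySem.Dict Int (List String) :=
    grouped.foldl (fun buckets dp => buckets.modify (pvScore dp.2) [] (fun l => l ++ [dp.1]))
      PySem.Dict.empty
  (PySem.List.sorted buckets.keys (fun s => s) true).foldl
    (fun out s => out ++ buckets.getD s []) []

-- ===== PRECONDITION & SPEC =====
def Spec_score_grouped_dishes (grouped : List (String × List (String × String))) (out : List String) : Prop := out = score_grouped_dishes_alt grouped
instance (grouped : List (String × List (String × String))) (out : List String) : Decidable (Spec_score_grouped_dishes grouped out) := by unfold Spec_score_grouped_dishes; infer_instance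

-- ===== CLAIM (what is proved, stated in full; the proofs are below) =====
def Claim_equal_score_grouped_dishes : Prop := ∀ (grouped : List (String × List (String × String))), Dom_score_grouped_dishes grouped → Spec_score_grouped_dishes grouped (score_grouped_dishes grouped)

-- ===== LEMMAS AND PROOFS =====

theorem pvScoreSteps_eq_pvScore (parts : List (String × String)) :
    pvScoreSteps parts = pvScore parts := by
  unfold pvScoreSteps pvScore
  split_ifs <;> norm_num

theorem pvInsertBy_append_front {α : Type} (before : α → α → Bool) (x : α) (l r : List α)
    (h : ∀ y ∈ l, before x y = false) :
    PySem.List.insertBy before x (l ++ r) = l ++ PySem.List.insertBy before x r := by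
  induction l with
  | nil => simp
  | cons y ys ih =>
      have hy : before x y = false := h y (by simp)
      simp only [List.cons_append, PySem.List.insertBy, hy, Bool.false_eq_true, if_false]
      exact congrArg (y :: ·) (ih (fun z hz => h z (by simp [hz])))

theorem pvInsertBy_head_before {α : Type} (before : α → α → Bool) (x : α) (r : List α)
    (h : ∀ y ∈ r, before x y = true) :
    PySem.List.insertBy before x r = x :: r := by
  cases r with
  | nil => rfl
  | cons y ys => simp [PySem.List.insertBy, h y (by simp)]

-- inserting one element into the bucket concatenation lands it at the end of its own bucket
theorem pvInsertBy_flatMap (K : List Int) (xs : List (String × Int)) (x : String × Int)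
    (hK : K.Pairwise (fun a b => b < a)) (hx : x.2 ∈ K) :
    PySem.List.insertBy (fun a b => decide (b.2 < a.2)) x
        (K.flatMap (fun s => xs.filter (fun p => p.2 == s)))
      = K.flatMap (fun s => (xs ++ [x]).filter (fun p => p.2 == s)) := by
  induction K with
  | nil => exact absurd hx (by simp)
  | cons k K' ih =>
      have hlt : ∀ s ∈ K', s < k := by
        intro s hs; exact (List.pairwise_cons.mp hK).1 s hs
      have hK' : K'.Pairwise (fun a b => b < a) := (List.pairwise_cons.mp hK).2
      simp only [List.flatMap_cons, List.filter_append]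
      by_cases hk : x.2 = k
      · -- x belongs to the first bucket: it passes the equal-key prefix and stops
        rw [pvInsertBy_append_front _ _ _ _ (by
          intro y hy
          have : y.2 = k := by
            have := List.of_mem_filter hy
            simpa using this
          simp [this, hk])]
        rw [pvInsertBy_head_before _ _ _ (by
          intro y hy
          obtain ⟨s, hs, hyf⟩ := List.mem_flatMap.mp hy
          have hy2 : y.2 = s := by
            have := List.of_mem_filter hyf
            simpa using this
          simp [hy2, hk]
          exact hlt s hs)]
        have hx1 : (List.filter (fun p => p.2 == k) [x]) = [x] := by simp [hk]
        have hrest : K'.flatMap (fun s => xs.filter (fun p => p.2 == s) ++ List.filter (fun p => p.2 == s) [x])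
            = K'.flatMap (fun s => xs.filter (fun p => p.2 == s)) := by
          apply List.flatMap_congr
          intro s hs
          have : (List.filter (fun p => p.2 == s) [x]) = [] := by
            have : x.2 ≠ s := by
              have := hlt s hs; omega
            simp [this]
          simp [this]
        rw [hrest, hx1]
        simp
      · -- x belongs to a later bucket: it passes the whole first bucket
        have hx' : x.2 ∈ K' := by
          cases hx with
          | head => exact absurd rfl hk
          | tail _ h => exact h
        have hxk : x.2 < k := hlt _ hx'
        rw [pvInsertBy_append_front _ _ _ _ (by
          intro y hy
          have hy2 : y.2 = k := by
            have := List.of_mem_filter hy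
            simpa using this
          simp [hy2]
          omega)]
        have hx1 : (List.filter (fun p => p.2 == k) [x]) = [] := by simp [hk]
        rw [hx1, ih hK' hx']
        simp

-- a stable reverse sort by score is the concatenation of the score buckets, highest first
theorem pvSorted_rev_eq_flatMap (xs : List (String × Int)) (K : List Int)
    (hK : K.Pairwise (fun a b => b < a)) (hmem : ∀ p ∈ xs, p.2 ∈ K) :
    PySem.List.sorted xs (fun p => p.2) true
      = K.flatMap (fun s => xs.filter (fun p => p.2 == s)) := by
  induction xs using List.reverseRecOn with
  | nil => simp [PySem.List.sorted_rev_eq_foldl_insertBy]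
  | append_singleton ys x ih =>
      have hys : ∀ p ∈ ys, p.2 ∈ K := fun p hp => hmem p (by simp [hp])
      have hx : x.2 ∈ K := hmem x (by simp)
      rw [PySem.List.sorted_rev_eq_foldl_insertBy, List.foldl_append, List.foldl_cons,
        List.foldl_nil, ← PySem.List.sorted_rev_eq_foldl_insertBy, ih hys]
      exact pvInsertBy_flatMap K ys x hK hx

theorem score_grouped_dishes_eq (grouped : List (String × List (String × String))) :
    score_grouped_dishes grouped = score_grouped_dishes_alt grouped := by
  unfold score_grouped_dishes score_grouped_dishes_alt
  -- the common per-dish score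
  have hstep : (fun (scored : List (String × Int)) (dp : String × List (String × String)) =>
      scored ++ [(dp.1, pvScoreSteps dp.2)]) = fun scored dp => scored ++ [(dp.1, pvScore dp.2)] := by
    funext scored dp; rw [pvScoreSteps_eq_pvScore]
  have hfold : grouped.foldl (fun scored dp => scored ++ [(dp.1, pvScoreSteps dp.2)]) []
      = grouped.map (fun dp => (dp.1, pvScore dp.2)) := by
    rw [hstep, PySem.List.foldl_append_singleton_eq_map, List.nil_append]
  simp only [hfold]
  set scored : List (String × Int) := grouped.map (fun dp => (dp.1, pvScore dp.2)) with hscored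
  set buckets : PySem.Dict Int (List String) :=
    grouped.foldl (fun buckets dp => buckets.modify (pvScore dp.2) [] (fun l => l ++ [dp.1]))
      PySem.Dict.empty with hbuckets
  -- the bucket dict, re-read as a grouping fold over (score, dish) pairs
  have hb2 : buckets = (grouped.map (fun dp => (pvScore dp.2, dp.1))).foldl
      (fun d q => d.modify q.1 [] (fun l => l ++ [q.2])) PySem.Dict.empty := by
    rw [List.foldl_map]
  have hgetD : ∀ s : Int, buckets.getD s []
      = (grouped.filter (fun dp => pvScore dp.2 == s)).map (fun dp => dp.1) := by
    intro s
    rw [hb2, PySem.Dict.getD_foldl_modify_append]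
    simp [List.filter_map, Function.comp_def, List.map_map]
  have hkeys : buckets.keys = PySem.Set.ofList (grouped.map (fun dp => pvScore dp.2)) := by
    rw [hbuckets]
    rw [PySem.Dict.keys_foldl_modify_key grouped (fun dp => pvScore dp.2) []
      (fun _ dp => fun l => l ++ [dp.1]) PySem.Dict.empty]
    rw [PySem.Dict.keys_empty]
    rfl
  set K : List Int := PySem.List.sorted buckets.keys (fun s => s) true with hKdef
  have hKnodup : K.Nodup := by
    refine ((PySem.List.sorted_perm _ _ _).nodup_iff).mpr ?_
    rw [hkeys]; exact PySem.Set.nodup_ofList _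
  have hKdesc : K.Pairwise (fun a b => b < a) := by
    have h1 : K.Pairwise (fun a b => b ≤ a) := PySem.List.sorted_pairwise_rev _ _
    have := h1.and hKnodup
    exact this.imp (by intro a b ⟨hle, hne⟩; omega)
  have hmem : ∀ p ∈ scored, p.2 ∈ K := by
    intro p hp
    rw [hscored] at hp
    obtain ⟨dp, hdp, rfl⟩ := List.mem_map.mp hp
    rw [hKdef, PySem.List.mem_sorted, hkeys, PySem.Set.mem_ofList]
    exact List.mem_map.mpr ⟨dp, hdp, rfl⟩
  rw [pvSorted_rev_eq_flatMap scored K hKdesc hmem,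
    PySem.List.foldl_append_eq_flatMap, List.nil_append, List.map_flatMap]
  apply List.flatMap_congr
  intro s _
  rw [hgetD s, hscored]
  simp [List.filter_map, Function.comp_def, List.map_map]

-- ===== VERDICT (by name: the statement is the Claim_ definition above) =====
theorem score_grouped_dishes_spec : Claim_equal_score_grouped_dishes := by
  intro grouped _
  unfold Spec_score_grouped_dishes
  exact score_grouped_dishes_eq grouped
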